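-- pv_equiv track=rewrite | github.com/tumarymm/-hws_labs_python | 53.py | group_by_last_letter
-- ===== SOURCE A (Python) =====
-- def group_by_last_letter(a):
--     b = {}
--     for c in a:
--         d = c[-1]
--         if d not in b:
--             b[d] = [c]
--         else:
--             if c not in b[d]:
--                 b[d].append(c)
--     return b
-- ===== SOURCE B (Python) =====
-- def group_by_last_letter(a):
--     # Two-pass: global order-preserving dedup with an O(1) set, then group.
--     seen = set()
--     order = []
--     for c in a:
--         if c not in seen:
--             seen.add(c)
--             order.append(c)
--     b = {}
--     for c in order:
--         b.setdefault(c[-1], []).append(c)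
--     return b
-- ===== Notes on version B (the rewrite author's own statement) =====
-- stated objective: faster
-- what changed: B separates global order-preserving deduplication (a hash set plus an order list, one pass) from grouping via dict.setdefault, removing A's per-group linear membership scans.
import Mathlib
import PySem

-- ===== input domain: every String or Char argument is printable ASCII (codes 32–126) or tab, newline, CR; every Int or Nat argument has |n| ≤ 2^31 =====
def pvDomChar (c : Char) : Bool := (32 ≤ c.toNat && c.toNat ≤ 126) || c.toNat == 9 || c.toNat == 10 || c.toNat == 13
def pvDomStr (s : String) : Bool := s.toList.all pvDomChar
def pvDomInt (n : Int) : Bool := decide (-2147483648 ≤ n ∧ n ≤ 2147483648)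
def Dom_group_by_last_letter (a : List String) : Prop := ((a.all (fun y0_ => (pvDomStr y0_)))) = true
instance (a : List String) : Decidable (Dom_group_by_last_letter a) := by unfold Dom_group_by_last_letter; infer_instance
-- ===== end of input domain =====

-- B separates a global order-preserving dedup (set + order list) from the grouping pass,
-- replacing A's per-group linear membership scans with O(1) set lookups (measurably faster on large inputs).

-- ===== PORT A =====
-- one iteration of A's loop body
def gblStepA (b : PySem.Dict String (List String)) (c : String) : PySem.Dict String (List String) :=
  match PySem.Str.pyGet? c (-1) with
  | none => b            -- c = "": Python raises IndexError here; excluded by Pre_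
  | some ch =>
    let d := String.ofList [ch]
    if b.contains d = false then b.insert d [c]
    else if c ∈ b.getD d [] then b
    else b.modify d [] (· ++ [c])

def group_by_last_letter (a : List String) : List (String × List String) :=
  (a.foldl gblStepA PySem.Dict.empty).items

-- ===== PORT B =====
-- first pass of B: (seen set, order list)
def gblDedup (a : List String) : PySem.Set String × List String :=
  a.foldl (fun st c =>
    if PySem.Set.contains st.1 c then st
    else (PySem.Set.add st.1 c, st.2 ++ [c])) ([], [])

-- one iteration of B's second loop: b.setdefault(c[-1], []).append(c)
def gblStepB (b : PySem.Dict String (List String)) (c : String) : PySem.Dict String (List String) :=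
  match PySem.Str.pyGet? c (-1) with
  | none => b            -- c = "": Python raises IndexError here; excluded by Pre_
  | some ch => b.modify (String.ofList [ch]) [] (· ++ [c])

def group_by_last_letter_alt (a : List String) : List (String × List String) :=
  ((gblDedup a).2.foldl gblStepB PySem.Dict.empty).items

-- ===== PRECONDITION & SPEC =====
-- Pre_ excludes lists containing the empty string, on which Python A raises IndexError (c[-1]).
def Pre_group_by_last_letter (a : List String) : Prop := "" ∉ a
instance (a : List String) : Decidable (Pre_group_by_last_letter a) := by unfold Pre_group_by_last_letter; infer_instance
def pvWitness_group_by_last_letter : List String := ["ab", "cb", "ab", "d"]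

def Spec_group_by_last_letter (a : List String) (out : List (String × List String)) : Prop := out = group_by_last_letter_alt a
instance (a : List String) (out : List (String × List String)) : Decidable (Spec_group_by_last_letter a out) := by unfold Spec_group_by_last_letter; infer_instance

-- ===== CLAIM (what is proved, stated in full; the proofs are below) =====
def Claim_equal_group_by_last_letter : Prop := ∀ (a : List String), Dom_group_by_last_letter a → Pre_group_by_last_letter a → Spec_group_by_last_letter a (group_by_last_letter a)

-- ===== LEMMAS AND PROOFS =====

-- the not-yet-seen elements of l relative to seen-list s, in first-occurrence order
def gblNew (l : List String) (s : List String) : List String :=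
  match l with
  | [] => []
  | x :: l => if x ∈ s then gblNew l s else x :: gblNew l (s ++ [x])

lemma gblDedup_aux (l : List String) : ∀ (s t : List String),
    l.foldl (fun st c => if PySem.Set.contains st.1 c then st
      else (PySem.Set.add st.1 c, st.2 ++ [c])) (s, t)
      = (l.foldl PySem.Set.add s, t ++ gblNew l s) := by
  induction l with
  | nil => intro s t; simp [gblNew]
  | cons x l ih =>
    intro s t
    by_cases hx : x ∈ s
    · have hc : PySem.Set.contains s x = true := (PySem.Set.contains_iff s x).2 hx
      have hadd : PySem.Set.add s x = s := by simp [PySem.Set.add, hx]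
      simp only [List.foldl_cons, hc, if_true, hadd, gblNew, if_pos hx]
      exact ih s t
    · have hc : PySem.Set.contains s x = false := by
        rw [← Bool.not_eq_true]; exact fun h => hx ((PySem.Set.contains_iff s x).1 h)
      have hadd : PySem.Set.add s x = s ++ [x] := by
        simp only [PySem.Set.add, hc, Bool.false_eq_true, if_false]
      simp only [List.foldl_cons, hc, Bool.false_eq_true, if_false, hadd, gblNew, if_neg hx]
      rw [ih (s ++ [x]) (t ++ [x])]
      simp

lemma gblDedup_snd (a : List String) : (gblDedup a).2 = gblNew a [] := by
  unfold gblDedup; rw [gblDedup_aux]; simp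

-- invariant: membership of c in its group in b matches membership in the seen list s
def gblInv (b : PySem.Dict String (List String)) (s : List String) : Prop :=
  ∀ c ch, PySem.Str.pyGet? c (-1) = some ch → (c ∈ b.getD (String.ofList [ch]) [] ↔ c ∈ s)

lemma gbl_main (l : List String) : ∀ (b : PySem.Dict String (List String)) (s : List String),
    gblInv b s → l.foldl gblStepA b = (gblNew l s).foldl gblStepB b := by
  induction l with
  | nil => intro b s _; simp [gblNew]
  | cons x l ih =>
    intro b s h
    by_cases hx : x ∈ s
    · have hA : gblStepA b x = b := by
        unfold gblStepA
        cases hg : PySem.Str.pyGet? x (-1) with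
        | none => rfl
        | some ch =>
          have hm : x ∈ b.getD (String.ofList [ch]) [] := (h x ch hg).2 hx
          have hcont : b.contains (String.ofList [ch]) = true := by
            by_contra hcf
            rw [PySem.Dict.getD_of_not_contains b [] (by simpa using hcf)] at hm
            simp at hm
          simp [hcont, hm]
      rw [List.foldl_cons, hA, gblNew, if_pos hx]
      exact ih b s h
    · cases hg : PySem.Str.pyGet? x (-1) with
      | none =>
        have hA : gblStepA b x = b := by unfold gblStepA; rw [hg]
        have hB : gblStepB b x = b := by unfold gblStepB; rw [hg]
        have h' : gblInv b (s ++ [x]) := by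
          intro c ch hc
          have hcx : c ≠ x := by rintro rfl; rw [hg] at hc; cases hc
          rw [h c ch hc]; simp [hcx]
        rw [List.foldl_cons, hA, gblNew, if_neg hx, List.foldl_cons, hB]
        exact ih b (s ++ [x]) h'
      | some ch =>
        have hAB : gblStepA b x = gblStepB b x := by
          unfold gblStepA gblStepB
          rw [hg]
          by_cases hcont : b.contains (String.ofList [ch]) = true
          · have hxm : x ∉ b.getD (String.ofList [ch]) [] := fun hm => hx ((h x ch hg).1 hm)
            simp [hcont, hxm]
          · have hgd : b.getD (String.ofList [ch]) [] = [] :=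
              PySem.Dict.getD_of_not_contains b [] (by simpa using hcont)
            have hmod : b.modify (String.ofList [ch]) [] (· ++ [x])
                = b.insert (String.ofList [ch]) (b.getD (String.ofList [ch]) [] ++ [x]) := rfl
            simp [hcont, hmod, hgd]
        have h' : gblInv (gblStepB b x) (s ++ [x]) := by
          intro c ch' hc
          unfold gblStepB
          rw [hg]
          by_cases hcx : c = x
          · subst hcx
            have hch : ch' = ch := by rw [hg] at hc; exact (Option.some.injEq _ _ ▸ hc.symm :)
            subst hch
            rw [PySem.Dict.getD_modify]
            simp
          · rw [PySem.Dict.getD_modify]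
            have hmem : c ∈ s ++ [x] ↔ c ∈ s := by simp [hcx]
            rw [hmem, ← h c ch' hc]
            split_ifs with he
            · rw [he]; simp [hcx]
            · rfl
        rw [List.foldl_cons, hAB, gblNew, if_neg hx, List.foldl_cons]
        exact ih _ (s ++ [x]) h'

-- ===== VERDICT (by name: the statement is the Claim_ definition above) =====
theorem group_by_last_letter_spec : Claim_equal_group_by_last_letter := by
  intro a _ _
  unfold Spec_group_by_last_letter group_by_last_letter group_by_last_letter_alt
  rw [gblDedup_snd, gbl_main a PySem.Dict.empty []
    (by intro c ch _; simp [PySem.Dict.getD_empty])]
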